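-- pv_equiv track=rewrite | github.com/Omenranr/rag-video | open-video-rag/utils/chat.py | format_history_as_text
-- ===== SOURCE A (Python) =====
-- from typing import List, Dict, Optional, Tuple
--
-- def format_history_as_text(history_msgs: List[Dict], max_turns: int = 8, max_chars: int = 6000) -> str:
--     """
--     Convert recent chat history into a compact text transcript for prompting.
--     Keeps the last `max_turns` messages (user+assistant counts as 2).
--     Also enforces an approximate char cap.
--     """
--     if not history_msgs:
--         return ""
--     # keep last N
--     recent = history_msgs[-max_turns:]
--     lines: List[str] = []
--     total = 0
--     for m in recent:
--         role = m.get("role", "user")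
--         content = str(m.get("content", "")).strip()
--         pref = "User" if role == "user" else "Assistant"
--         line = f"{pref}: {content}"
--         total += len(line)
--         lines.append(line)
--         if total >= max_chars:
--             break
--     return "\n".join(lines)
-- ===== SOURCE B (Python) =====
-- def format_history_as_text(history_msgs, max_turns=8, max_chars=6000):
--     if not history_msgs:
--         return ""
--     lines = [
--         ("User" if m.get("role", "user") == "user" else "Assistant")
--         + ": " + str(m.get("content", "")).strip()
--         for m in history_msgs[-max_turns:]
--     ]
--     t = 0
--     cum = [(t := t + len(line)) for line in lines]
--     keep = next((i + 1 for i, c in enumerate(cum) if c >= max_chars), len(lines))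
--     return "\n".join(lines[:keep])
-- ===== Notes on version B (the rewrite author's own statement) =====
-- stated objective: alternative
-- what changed: A's single loop that formats, accumulates a running total, appends and breaks is replaced by building all formatted lines with a comprehension, taking running character sums with a walrus comprehension, locating the first crossing index via next(enumerate(...)), and slicing-and-joining.
import Mathlib
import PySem

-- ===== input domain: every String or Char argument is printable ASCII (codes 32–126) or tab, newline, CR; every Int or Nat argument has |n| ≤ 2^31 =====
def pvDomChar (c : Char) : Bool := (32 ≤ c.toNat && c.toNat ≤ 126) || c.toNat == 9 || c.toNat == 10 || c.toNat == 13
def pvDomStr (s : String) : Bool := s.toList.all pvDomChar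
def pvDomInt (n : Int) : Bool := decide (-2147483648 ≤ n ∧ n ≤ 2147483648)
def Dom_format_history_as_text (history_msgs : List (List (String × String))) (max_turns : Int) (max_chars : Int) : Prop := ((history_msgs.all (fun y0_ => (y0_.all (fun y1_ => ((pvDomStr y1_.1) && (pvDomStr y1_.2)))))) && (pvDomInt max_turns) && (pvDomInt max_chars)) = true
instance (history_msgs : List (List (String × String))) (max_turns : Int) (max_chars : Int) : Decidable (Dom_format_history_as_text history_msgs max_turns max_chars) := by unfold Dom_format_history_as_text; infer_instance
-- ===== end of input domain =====

-- B replaces A's single accumulate-append-break loop by: build all lines with a comprehension,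
-- take the running character sums with a walrus comprehension, find the first crossing index
-- with next(enumerate(...)), and slice-and-join. Objective: alternative decomposition, same cost.

-- ===== PORT A =====
-- A's loop: accumulate the formatted line, the running total, and break when total >= max_chars.
def fhLoopA (mc : Int) : List (List (String × String)) → List String → Int → List String
  | [], lines, _ => lines
  | m :: rest, lines, total =>
    let d := PySem.Dict.ofList m
    let role := d.getD "role" "user"
    let content := PySem.Str.strip (d.getD "content" "")
    let pref := if role == "user" then "User" else "Assistant"
    let line := pref ++ ": " ++ content
    let total := total + PySem.Str.len line
    let lines := lines ++ [line]
    if mc ≤ total then lines else fhLoopA mc rest lines total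

def format_history_as_text (history_msgs : List (List (String × String))) (max_turns : Int) (max_chars : Int) : String :=
  if history_msgs = [] then ""
  else
    let recent := PySem.List.slice history_msgs (some (-max_turns)) none
    PySem.Str.join "\n" (fhLoopA max_chars recent [] 0)

-- ===== PORT B =====
-- one formatted line (the comprehension body in Source B)
def fhLineB (m : List (String × String)) : String :=
  (if (PySem.Dict.ofList m).getD "role" "user" == "user" then "User" else "Assistant")
    ++ ": " ++ PySem.Str.strip ((PySem.Dict.ofList m).getD "content" "")

-- the walrus comprehension [(t := t + len(line)) for line in lines]
def fhCumB : List String → Int → List Int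
  | [], _ => []
  | l :: ls, t => (t + PySem.Str.len l) :: fhCumB ls (t + PySem.Str.len l)

def format_history_as_text_alt (history_msgs : List (List (String × String))) (max_turns : Int) (max_chars : Int) : String :=
  if history_msgs = [] then ""
  else
    let lines := (PySem.List.slice history_msgs (some (-max_turns)) none).map fhLineB
    let cum := fhCumB lines 0
    let keep : Int :=
      match (PySem.List.enumerate cum 0).find? (fun p => decide (max_chars ≤ p.2)) with
      | some p => p.1 + 1
      | none => (lines.length : Int)
    PySem.Str.join "\n" (PySem.List.slice lines none (some keep))

-- ===== PRECONDITION & SPEC =====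
def Spec_format_history_as_text (history_msgs : List (List (String × String))) (max_turns : Int) (max_chars : Int) (out : String) : Prop := out = format_history_as_text_alt history_msgs max_turns max_chars
instance (history_msgs : List (List (String × String))) (max_turns : Int) (max_chars : Int) (out : String) : Decidable (Spec_format_history_as_text history_msgs max_turns max_chars out) := by unfold Spec_format_history_as_text; infer_instance

-- ===== CLAIM (what is proved, stated in full; the proofs are below) =====
def Claim_equal_format_history_as_text : Prop := ∀ (history_msgs : List (List (String × String))) (max_turns : Int) (max_chars : Int), Dom_format_history_as_text history_msgs max_turns max_chars → Spec_format_history_as_text history_msgs max_turns max_chars (format_history_as_text history_msgs max_turns max_chars)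

-- ===== LEMMAS AND PROOFS =====

-- number of lines A's loop keeps, as a recursive count over the lines with the running total
def fhKeep (mc : Int) : List String → Int → Nat
  | [], _ => 0
  | l :: ls, t =>
    if mc ≤ t + PySem.Str.len l then 1 else 1 + fhKeep mc ls (t + PySem.Str.len l)

-- the body of A's loop, written with fhLineB (definitionally equal: same let-chain)
theorem fhLoopA_cons (mc : Int) (m : List (String × String))
    (rest : List (List (String × String))) (acc : List String) (t : Int) :
    fhLoopA mc (m :: rest) acc t =
      if mc ≤ t + PySem.Str.len (fhLineB m) then acc ++ [fhLineB m]
      else fhLoopA mc rest (acc ++ [fhLineB m]) (t + PySem.Str.len (fhLineB m)) := rfl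

theorem fhLoopA_eq (mc : Int) (ms : List (List (String × String))) :
    ∀ (acc : List String) (t : Int),
      fhLoopA mc ms acc t = acc ++ (ms.map fhLineB).take (fhKeep mc (ms.map fhLineB) t) := by
  induction ms with
  | nil => intro acc t; simp [fhLoopA, fhKeep]
  | cons m rest ih =>
    intro acc t
    rw [fhLoopA_cons]
    simp only [List.map_cons, fhKeep]
    split_ifs with h
    · simp only [List.take_succ_cons, List.take_zero]
    · rw [ih]
      rw [Nat.add_comm 1 _, List.take_succ_cons]
      simp only [List.append_assoc, List.singleton_append]

theorem fhKeepB_eq (mc : Int) (ls : List String) :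
    ∀ (t : Int) (s : Int),
      (match (PySem.List.enumerate (fhCumB ls t) s).find? (fun p => decide (mc ≤ p.2)) with
       | some p => p.1 + 1
       | none => s + (ls.length : Int)) = s + (fhKeep mc ls t : Int) := by
  induction ls with
  | nil => intro t s; simp [fhCumB, fhKeep]
  | cons l rest ih =>
    intro t s
    have hIH := ih (t + PySem.Str.len l) (s + 1)
    simp only [fhCumB, fhKeep, PySem.List.enumerate, List.find?, PySem.Str.len_eq,
      List.length_cons] at *
    simp only [String.length_toList] at *
    by_cases h : mc ≤ t + (l.length : Int)
    · simp [h]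
    · simp only [h, decide_false]
      simp only [if_false]
      cases hf : List.find? (fun p => decide (mc ≤ p.2))
          (PySem.List.enumerate (fhCumB rest (t + (l.length : Int))) (s + 1)) with
      | none =>
        simp only [hf] at hIH ⊢
        push_cast at hIH ⊢
        linarith
      | some p =>
        simp only [hf] at hIH ⊢
        push_cast at hIH ⊢
        linarith

-- ===== VERDICT (by name: the statement is the Claim_ definition above) =====
theorem format_history_as_text_spec : Claim_equal_format_history_as_text := by
  intro h mt mc _
  unfold Spec_format_history_as_text format_history_as_text format_history_as_text_alt
  by_cases hh : h = []
  · simp [hh]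
  · simp only [hh, if_false]
    rw [fhLoopA_eq mc _ [] 0, List.nil_append]
    have hk := fhKeepB_eq mc ((PySem.List.slice h (some (-mt)) none).map fhLineB) 0 0
    simp only [zero_add] at hk
    rw [hk, PySem.List.slice_to _ (Int.natCast_nonneg _)]
    simp
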